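-- pv_equiv track=rewrite | github.com/arunpokali/PythonProjects | PowerProgrammer/rod_cut.py | Min_Rod_Value
-- ===== SOURCE A (Python) =====
-- def Min_Rod_Value(Rod_Length, Rod_Price_List):
--
--     DP = [10**7 + 9 for _ in range(Rod_Length+1)]
--     DP[0] = 0
--     for i in range(1, Rod_Length + 1):
--         for j in range(len(Rod_Price_List)):
--             if i >= (j+1):
--                 DP[i] = min(DP[i], DP[i-(j+1)]+Rod_Price_List[j])
--
--     return DP[-1]
-- ===== SOURCE B (Python) =====
-- def Min_Rod_Value(Rod_Length, Rod_Price_List):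
--     memo = {0: 0}
--
--     def best_cost(n):
--         if n in memo:
--             return memo[n]
--         best = 10**7 + 9
--         for j in range(len(Rod_Price_List)):
--             if j + 1 <= n:
--                 best = min(best, best_cost(n - (j + 1)) + Rod_Price_List[j])
--         memo[n] = best
--         return best
--
--     # seed the memo at stride-500 targets so the recursion stays shallow
--     for t in range(0, Rod_Length, 500):
--         best_cost(t)
--     return best_cost(Rod_Length)
-- ===== Notes on version B (the rewrite author's own statement) =====
-- stated objective: alternative
-- what changed: Replaces A's bottom-up DP that fills a preallocated size-(n+1) table with nested index loops by top-down memoized recursion: a recursive best_cost(n) computing the same recurrence on demand with a dict memo seeded with {0: 0} (plus a stride-500 seeding loop that only keeps Python's recursion depth bounded).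
import Mathlib
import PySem

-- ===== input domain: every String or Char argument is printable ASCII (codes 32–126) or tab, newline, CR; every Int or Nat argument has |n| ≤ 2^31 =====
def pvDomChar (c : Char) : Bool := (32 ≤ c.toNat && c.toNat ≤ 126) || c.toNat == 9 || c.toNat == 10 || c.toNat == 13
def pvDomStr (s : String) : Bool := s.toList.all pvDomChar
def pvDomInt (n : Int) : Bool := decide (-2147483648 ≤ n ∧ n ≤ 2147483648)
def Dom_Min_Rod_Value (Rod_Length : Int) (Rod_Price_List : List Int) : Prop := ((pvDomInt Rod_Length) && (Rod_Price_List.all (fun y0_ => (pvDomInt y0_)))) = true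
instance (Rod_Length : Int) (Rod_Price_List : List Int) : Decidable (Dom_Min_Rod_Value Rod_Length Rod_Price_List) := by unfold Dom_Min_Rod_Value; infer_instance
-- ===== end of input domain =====

-- B replaces A's bottom-up table DP by top-down memoized recursion of the same recurrence (no speed claim).


-- ===== PORT A =====
-- bottom-up table DP: DP[i] = min(DP[i], DP[i-(j+1)] + price[j]) over all j, targets i ascending
def Min_Rod_Value (Rod_Length : Int) (Rod_Price_List : List Int) : Int :=
  let DP := ((PySem.List.pyRange 0 (Rod_Length + 1)).map (fun _ => (10 ^ 7 + 9 : Int))).toArray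
  let DP := DP.setIfInBounds 0 0
  let DP := (PySem.List.pyRange 1 (Rod_Length + 1)).foldl (fun DP i =>
    (PySem.List.pyRange 0 ((Rod_Price_List.length : Nat) : Int)).foldl (fun DP j =>
      if i ≥ j + 1 then
        DP.setIfInBounds i.toNat (min (DP.getD i.toNat 0)
          (DP.getD (i - (j + 1)).toNat 0 + PySem.List.pyGetD Rod_Price_List j 0))
      else DP) DP) DP
  -- DP[-1]: hand-ported as the last entry; exact whenever DP is nonempty (under Pre_, DP has Rod_Length+1 ≥ 1 entries)
  DP.getD (DP.size - 1) 0

-- ===== PORT B =====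
-- top-down memoized recursion: best_cost(n) = min over feasible first cuts j+1 of best_cost(n-(j+1)) + price[j],
-- with a dict memo seeded {0: 0}.  The Nat `fuel` argument (not in Source B) only makes the recursion structurally
-- terminating; it starts at Rod_Length.toNat + 1 and never runs out, since every recursive call strictly
-- decreases max(n,0) by at least 1 while fuel decreases by exactly 1.
def bestCost (P : List Int) (fuel : Nat) (n : Int) (memo : PySem.Dict Int Int) :
    Int × PySem.Dict Int Int :=
  match fuel with
  | 0 => (10 ^ 7 + 9, memo)  -- fuel exhaustion: unreachable (see comment above)
  | fuel' + 1 =>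
    match memo.get? n with
    | some v => (v, memo)
    | none =>
      let r := (PySem.List.pyRange 0 ((P.length : Nat) : Int)).foldl
        (fun (acc : Int × PySem.Dict Int Int) j =>
          if j + 1 ≤ n then
            (min acc.1 ((bestCost P fuel' (n - (j + 1)) acc.2).1 + PySem.List.pyGetD P j 0),
              (bestCost P fuel' (n - (j + 1)) acc.2).2)
          else acc) ((10 ^ 7 + 9 : Int), memo)
      (r.1, r.2.insert n r.1)
termination_by fuel

def Min_Rod_Value_alt (Rod_Length : Int) (Rod_Price_List : List Int) : Int :=
  -- memo = {0: 0}
  let memo := (PySem.Dict.empty : PySem.Dict Int Int).insert 0 0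
  -- for t in range(0, Rod_Length, 500): best_cost(t)   (seeds the memo so Python recursion stays shallow)
  let memo := (PySem.List.pyRange 0 Rod_Length 500).foldl
    (fun memo t => (bestCost Rod_Price_List (t.toNat + 1) t memo).2) memo
  (bestCost Rod_Price_List (Rod_Length.toNat + 1) Rod_Length memo).1

-- ===== PRECONDITION & SPEC =====
-- Pre_ excludes negative Rod_Length, where A raises IndexError on DP[0] of an empty table.
def Pre_Min_Rod_Value (Rod_Length : Int) (Rod_Price_List : List Int) : Prop := 0 ≤ Rod_Length
instance (Rod_Length : Int) (Rod_Price_List : List Int) : Decidable (Pre_Min_Rod_Value Rod_Length Rod_Price_List) := by unfold Pre_Min_Rod_Value; infer_instance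
def pvWitness_Min_Rod_Value : Int × List Int := (4, [2, 5, 1])

def Spec_Min_Rod_Value (Rod_Length : Int) (Rod_Price_List : List Int) (out : Int) : Prop := out = Min_Rod_Value_alt Rod_Length Rod_Price_List
instance (Rod_Length : Int) (Rod_Price_List : List Int) (out : Int) : Decidable (Spec_Min_Rod_Value Rod_Length Rod_Price_List out) := by unfold Spec_Min_Rod_Value; infer_instance

-- ===== CLAIM (what is proved, stated in full; the proofs are below) =====
def Claim_equal_Min_Rod_Value : Prop := ∀ (Rod_Length : Int) (Rod_Price_List : List Int), Dom_Min_Rod_Value Rod_Length Rod_Price_List → Pre_Min_Rod_Value Rod_Length Rod_Price_List → Spec_Min_Rod_Value Rod_Length Rod_Price_List (Min_Rod_Value Rod_Length Rod_Price_List)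

-- ===== LEMMAS AND PROOFS =====

-- the sentinel
def rodSENT : Int := 10 ^ 7 + 9

-- the shared recurrence, as a functional table: rodTbl P n = [f 0, …, f n]
def rodTbl (P : List Int) : Nat → List Int
  | 0 => [0]
  | k + 1 =>
    let t := rodTbl P k
    t ++ [(List.range P.length).foldl
        (fun acc j => if j + 1 ≤ k + 1 then min acc (t.getD (k - j) 0 + P.getD j 0) else acc)
        rodSENT]

def rodF (P : List Int) (t : Nat) : Int := (rodTbl P t).getD t 0

def rodG (P : List Int) (t j : Nat) : Int := rodF P (t - 1 - j) + P.getD j 0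

-- A's table after outer passes 1..m: prefix finalized, rest sentinel
def rodHA (P : List Int) (m t : Nat) : Int := if t ≤ m then rodF P t else rodSENT

-- memo invariant for B: 0 ↦ 0 is present, and every entry is a true value of the recurrence
def rodInv (P : List Int) (memo : PySem.Dict Int Int) : Prop :=
  memo.get? 0 = some 0 ∧ ∀ k v, memo.get? k = some v → 0 ≤ k ∧ v = rodF P k.toNat

theorem length_rodTbl (P : List Int) (n : Nat) : (rodTbl P n).length = n + 1 := by
  induction n with
  | zero => rfl
  | succ k ih => simp [rodTbl, ih]

theorem getD_rodTbl_of_le (P : List Int) {m n : Nat} (h : m ≤ n) :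
    (rodTbl P n).getD m 0 = rodF P m := by
  induction n with
  | zero =>
    have : m = 0 := by omega
    subst this; rfl
  | succ k ih =>
    rcases Nat.lt_or_ge m (k + 1) with hm | hm
    · show ((rodTbl P k) ++ [_]).getD m 0 = rodF P m
      rw [List.getD_append _ _ _ _ (by rw [length_rodTbl]; omega)]
      exact ih (by omega)
    · have : m = k + 1 := by omega
      subst this; rfl

theorem guard_fold (L t : Nat) (g : Nat → Int) (acc : Int) :
    (List.range L).foldl (fun a j => if j + 1 ≤ t then min a (g j) else a) acc
      = (List.range (min t L)).foldl (fun a j => min a (g j)) acc := by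
  induction L with
  | zero => simp
  | succ L ih =>
    rw [List.range_succ, List.foldl_append]
    simp only [List.foldl_cons, List.foldl_nil]
    by_cases hL : L + 1 ≤ t
    · rw [if_pos hL, show min t (L + 1) = L + 1 from by omega, List.range_succ,
        List.foldl_append, ih, show min t L = L from by omega]
      simp
    · rw [if_neg hL, ih, show min t (L + 1) = min t L from by omega]

theorem f_char (P : List Int) (k : Nat) :
    rodF P (k + 1)
      = (List.range (min (k + 1) P.length)).foldl
          (fun acc j => min acc (rodG P (k + 1) j)) rodSENT := by
  show ((rodTbl P k) ++ [_]).getD (k + 1) 0 = _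
  rw [List.getD_eq_getElem _ 0 (by simp [length_rodTbl])]
  rw [List.getElem_append_right (by simp [length_rodTbl])]
  simp only [length_rodTbl, show k + 1 - (k + 1) = 0 from by omega, List.getElem_singleton]
  rw [← guard_fold P.length (k + 1) (rodG P (k + 1)) rodSENT]
  apply PySem.List.foldl_congr_mem
  intro acc j hj
  by_cases hg : j + 1 ≤ k + 1
  · rw [if_pos hg, if_pos hg]
    rw [getD_rodTbl_of_le P (by omega : k - j ≤ k)]
    unfold rodG
    rw [show k + 1 - 1 - j = k - j from by omega]
  · rw [if_neg hg, if_neg hg]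

theorem set_map_range {α : Type} (h : Nat → α) {k m : Nat} (hk : k < m) (v : α) :
    ((List.range m).map h).set k v = (List.range m).map (fun t => if t = k then v else h t) := by
  rw [List.ext_getElem_iff]
  constructor
  · simp
  · intro idx h1 h2
    simp only [List.getElem_set, List.getElem_map, List.getElem_range]
    by_cases hik : k = idx <;> simp [hik]
    intro hc; omega

theorem getD_map_range' {α : Type} (h : Nat → α) {k m : Nat} (hk : k < m) (d : α) :
    ((List.range m).map h).getD k d = h k := by
  rw [List.getD_eq_getElem _ d (by simpa using hk)]
  simp

theorem getD_set_self {α : Type} (l : List α) {i : Nat} (h : i < l.length) (v d : α) :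
    (l.set i v).getD i d = v := by
  simp [List.getD_eq_getElem?_getD, h]

theorem getD_set_ne {α : Type} (l : List α) {i k : Nat} (h : k ≠ i) (v d : α) :
    (l.set i v).getD k d = l.getD k d := by
  simp [List.getD_eq_getElem?_getD, List.getElem?_set_ne (by omega : i ≠ k)]

theorem innerA_go (P T : List Int) (i : Nat) (hi : i < T.length) :
    ∀ (js : List Nat) (acc : Int),
      js.foldl (fun DP j =>
          if ((i : Nat) : Int) ≥ ((j : Nat) : Int) + 1 then
            DP.set (((i : Nat) : Int)).toNat (min (PySem.List.pyGetD DP ((i : Nat) : Int) 0)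
              (PySem.List.pyGetD DP (((i : Nat) : Int) - (((j : Nat) : Int) + 1)) 0
                + PySem.List.pyGetD P ((j : Nat) : Int) 0))
          else DP) (T.set i acc)
      = T.set i (js.foldl (fun acc j =>
          if j + 1 ≤ i then min acc (T.getD (i - j - 1) 0 + P.getD j 0) else acc) acc) := by
  intro js
  induction js with
  | nil => intro acc; rfl
  | cons j js ih =>
    intro acc
    simp only [List.foldl_cons]
    by_cases hg : j + 1 ≤ i
    · rw [if_pos (by exact_mod_cast hg), if_pos hg]
      rw [show ((i : Nat) : Int) - (((j : Nat) : Int) + 1) = ((i - j - 1 : Nat) : Int) from by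
        omega]
      rw [PySem.List.pyGetD_natCast, PySem.List.pyGetD_natCast, PySem.List.pyGetD_natCast]
      rw [Int.toNat_natCast]
      rw [getD_set_self T hi, getD_set_ne T (by omega : i - j - 1 ≠ i), List.set_set]
      exact ih (min acc (T.getD (i - j - 1) 0 + P.getD j 0))
    · rw [if_neg (by intro hc; exact hg (by exact_mod_cast hc)), if_neg hg]
      exact ih acc

theorem innerA (P T : List Int) (i : Nat) (hi : i < T.length) :
    (PySem.List.pyRange 0 ((P.length : Nat) : Int)).foldl (fun DP j =>
        if ((i : Nat) : Int) ≥ j + 1 then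
          DP.set (((i : Nat) : Int)).toNat (min (PySem.List.pyGetD DP ((i : Nat) : Int) 0)
            (PySem.List.pyGetD DP (((i : Nat) : Int) - (j + 1)) 0 + PySem.List.pyGetD P j 0))
        else DP) T
    = T.set i ((List.range P.length).foldl
        (fun acc j => if j + 1 ≤ i then min acc (T.getD (i - j - 1) 0 + P.getD j 0) else acc)
        (T.getD i 0)) := by
  rw [PySem.List.pyRange_zero_natCast, List.foldl_map]
  have h0 : T.set i (T.getD i 0) = T := by
    rw [List.getD_eq_getElem T 0 hi]; exact List.set_getElem_self hi
  conv_lhs => rw [← h0]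
  exact innerA_go P T i hi (List.range P.length) (T.getD i 0)

theorem outerA (P : List Int) (n : Nat) :
    ∀ m : Nat, m ≤ n →
    (PySem.List.pyRange 1 ((m : Int) + 1)).foldl (fun DP i =>
      (PySem.List.pyRange 0 ((P.length : Nat) : Int)).foldl (fun DP j =>
        if i ≥ j + 1 then
          DP.set i.toNat (min (PySem.List.pyGetD DP i 0)
            (PySem.List.pyGetD DP (i - (j + 1)) 0 + PySem.List.pyGetD P j 0))
        else DP) DP) ((List.range (n + 1)).map (rodHA P 0))
      = (List.range (n + 1)).map (rodHA P m) := by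
  intro m
  induction m with
  | zero =>
    intro _
    rw [show PySem.List.pyRange 1 (((0 : Nat) : Int) + 1) = [] from
      PySem.List.pyRange_one_eq_nil (by norm_num)]
    rfl
  | succ m ih =>
    intro hm
    rw [show ((m + 1 : Nat) : Int) + 1 = (((m : Int) + 1) + 1) from by push_cast; ring]
    rw [PySem.List.pyRange_one_succ_right (by omega : (1:Int) ≤ (m : Int) + 1),
      List.foldl_append, ih (by omega)]
    simp only [List.foldl_cons, List.foldl_nil]
    rw [show ((m : Int) + 1) = (((m + 1 : Nat) : Nat) : Int) from by push_cast; ring]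
    rw [innerA P _ (m + 1) (by simp; omega)]
    have hT : ((List.range (n + 1)).map (rodHA P m)).getD (m + 1) 0 = rodSENT := by
      rw [getD_map_range' (rodHA P m) (by omega : m + 1 < n + 1)]
      unfold rodHA
      rw [if_neg (by omega)]
    rw [hT]
    have hfold : (List.range P.length).foldl
        (fun acc j => if j + 1 ≤ m + 1 then
          min acc (((List.range (n + 1)).map (rodHA P m)).getD (m + 1 - j - 1) 0 + P.getD j 0)
          else acc) rodSENT = rodF P (m + 1) := by
      rw [PySem.List.foldl_congr_mem _ _
        (fun acc j => if j + 1 ≤ m + 1 then min acc (rodG P (m + 1) j) else acc) _ ?_]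
      · rw [guard_fold P.length (m + 1) (rodG P (m + 1)) rodSENT]
        exact (f_char P m).symm
      · intro acc j _
        beta_reduce
        by_cases hg : j + 1 ≤ m + 1
        · rw [if_pos hg, if_pos hg]
          rw [getD_map_range' (rodHA P m) (by omega : m + 1 - j - 1 < n + 1)]
          unfold rodHA
          rw [if_pos (by omega : m + 1 - j - 1 ≤ m)]
          unfold rodG
          rw [show m + 1 - 1 - j = m + 1 - j - 1 from by omega]
        · rw [if_neg hg, if_neg hg]
    rw [hfold]
    rw [set_map_range (rodHA P m) (by omega : m + 1 < n + 1)]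
    apply List.map_congr_left
    intro t ht
    by_cases h1 : t = m + 1
    · subst h1
      unfold rodHA
      rw [if_pos rfl, if_pos (by omega)]
    · rw [if_neg h1]
      unfold rodHA
      by_cases h2 : t ≤ m
      · rw [if_pos h2, if_pos (by omega)]
      · rw [if_neg h2, if_neg (by omega)]

theorem arr_getD (l : List Int) (i : Nat) (d : Int) : l.toArray.getD i d = l.getD i d := by
  unfold Array.getD
  split
  · next h => rw [List.getD_eq_getElem l d (by simpa using h)]; simp
  · next h => rw [List.getD_eq_default _ _ (by simpa using h)]

theorem pyGetD_toNat (l : List Int) (i : Int) (hi : 0 ≤ i) (d : Int) :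
    PySem.List.pyGetD l i d = l.getD i.toNat d := by
  rw [show i = ((i.toNat : Nat) : Int) from by omega, PySem.List.pyGetD_natCast]
  rw [Int.toNat_natCast]

theorem foldl_toArray {β : Type} :
    ∀ (js : List β) (F : List Int → β → List Int) (G : Array Int → β → Array Int),
    (∀ (l : List Int) (x : β), x ∈ js → G l.toArray x = (F l x).toArray) →
    ∀ l : List Int, js.foldl G l.toArray = (js.foldl F l).toArray
  | [], _, _, _, _ => rfl
  | x :: js, F, G, h, l => by
      simp only [List.foldl_cons]
      rw [h l x (by simp)]
      exact foldl_toArray js F G (fun l' x' hx' => h l' x' (by simp [hx'])) _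

theorem A_eq (n : Nat) (P : List Int) :
    Min_Rod_Value ((n : Nat) : Int) P = rodF P n := by
  simp only [Min_Rod_Value]
  rw [show ((n : Nat) : Int) + 1 = (((n + 1 : Nat) : Nat) : Int) from by push_cast; ring]
  have hconst : (PySem.List.pyRange 0 (((n + 1 : Nat) : Nat) : Int)).map (fun _ => (10 ^ 7 + 9 : Int))
      = (List.range (n + 1)).map (fun _ : Nat => rodSENT) := by
    rw [PySem.List.pyRange_zero_natCast, List.map_map]
    rfl
  rw [hconst, List.setIfInBounds_toArray]
  have hinit : ((List.range (n + 1)).map (fun _ : Nat => rodSENT)).set 0 0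
      = (List.range (n + 1)).map (rodHA P 0) := by
    rw [set_map_range (fun _ => rodSENT) (by omega : 0 < n + 1)]
    apply List.map_congr_left
    intro t ht
    unfold rodHA
    by_cases h1 : t = 0
    · subst h1; rw [if_pos rfl, if_pos (by omega)]; rfl
    · rw [if_neg h1, if_neg (by omega)]
  rw [hinit]
  rw [show (((n + 1 : Nat) : Nat) : Int) = ((n : Int) + 1) from by push_cast; ring]
  rw [foldl_toArray (PySem.List.pyRange 1 ((n : Int) + 1))
    (fun DP i => (PySem.List.pyRange 0 ((P.length : Nat) : Int)).foldl (fun DP j =>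
      if i ≥ j + 1 then
        DP.set i.toNat (min (PySem.List.pyGetD DP i 0)
          (PySem.List.pyGetD DP (i - (j + 1)) 0 + PySem.List.pyGetD P j 0))
      else DP) DP) _
    (by
      intro l i hi
      have h1 : (1 : Int) ≤ i := (PySem.List.mem_pyRange_one.mp hi).1
      apply foldl_toArray
      intro l2 j hj
      have hj0 : (0 : Int) ≤ j := (PySem.List.mem_pyRange_one.mp hj).1
      by_cases hg : i ≥ j + 1
      · rw [if_pos hg, if_pos hg, arr_getD, arr_getD, List.setIfInBounds_toArray,
          pyGetD_toNat l2 i (by omega), pyGetD_toNat l2 (i - (j + 1)) (by omega)]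
      · rw [if_neg hg, if_neg hg])]
  rw [outerA P n n (le_refl n)]
  rw [show ((List.range (n + 1)).map (rodHA P n)).toArray.size = n + 1 from by simp]
  rw [arr_getD]
  rw [getD_map_range' (rodHA P n) (by omega : n + 1 - 1 < n + 1)]
  unfold rodHA
  rw [show n + 1 - 1 = n from by omega, if_pos (le_refl n)]

-- ---- B-side: correctness of the memoized recursion ----

-- the inner for-loop of best_cost, against the pure fold of the recurrence
theorem bc_fold (P : List Int) (fuel : Nat) (n : Int) (hn : 0 ≤ n) (hf : n.toNat ≤ fuel)
    (ih : ∀ (m : Int) (memo : PySem.Dict Int Int), rodInv P memo → 0 ≤ m → m.toNat < fuel →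
      (bestCost P fuel m memo).1 = rodF P m.toNat ∧ rodInv P (bestCost P fuel m memo).2) :
    ∀ (js : List Nat) (b : Int) (memo : PySem.Dict Int Int), rodInv P memo →
      ((js.map (fun k : Nat => (k : Int))).foldl
        (fun (acc : Int × PySem.Dict Int Int) j =>
          if j + 1 ≤ n then
            (min acc.1 ((bestCost P fuel (n - (j + 1)) acc.2).1 + PySem.List.pyGetD P j 0),
              (bestCost P fuel (n - (j + 1)) acc.2).2)
          else acc) (b, memo)).1
        = js.foldl (fun acc j => if j + 1 ≤ n.toNat then min acc (rodG P n.toNat j) else acc) b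
      ∧ rodInv P ((js.map (fun k : Nat => (k : Int))).foldl
        (fun (acc : Int × PySem.Dict Int Int) j =>
          if j + 1 ≤ n then
            (min acc.1 ((bestCost P fuel (n - (j + 1)) acc.2).1 + PySem.List.pyGetD P j 0),
              (bestCost P fuel (n - (j + 1)) acc.2).2)
          else acc) (b, memo)).2 := by
  intro js
  induction js with
  | nil => intro b memo hm; exact ⟨rfl, hm⟩
  | cons j js ihl =>
    intro b memo hm
    simp only [List.map_cons, List.foldl_cons]
    by_cases hg : j + 1 ≤ n.toNat
    · rw [if_pos (by omega : ((j : Nat) : Int) + 1 ≤ n), if_pos hg]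
      have harg0 : (0 : Int) ≤ n - ((j : Int) + 1) := by omega
      have hargf : (n - ((j : Int) + 1)).toNat < fuel := by omega
      obtain ⟨h1, h2⟩ := ih (n - ((j : Int) + 1)) memo hm harg0 hargf
      simp only [h1]
      have hval : rodF P (n - ((j : Int) + 1)).toNat + PySem.List.pyGetD P ((j : Nat) : Int) 0
          = rodG P n.toNat j := by
        rw [PySem.List.pyGetD_natCast]
        unfold rodG
        rw [show (n - ((j : Int) + 1)).toNat = n.toNat - 1 - j from by omega]
      rw [hval]
      exact ihl (min b (rodG P n.toNat j)) _ h2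
    · rw [if_neg (by omega : ¬ ((j : Nat) : Int) + 1 ≤ n), if_neg hg]
      exact ihl b memo hm

theorem bc_correct (P : List Int) :
    ∀ (fuel : Nat) (n : Int) (memo : PySem.Dict Int Int), rodInv P memo → 0 ≤ n → n.toNat < fuel →
      (bestCost P fuel n memo).1 = rodF P n.toNat ∧ rodInv P (bestCost P fuel n memo).2 := by
  intro fuel
  induction fuel with
  | zero => intro n memo _ _ h; omega
  | succ fuel ih =>
    intro n memo hm hn hf
    rw [bestCost]
    cases hg : memo.get? n with
    | some v =>
      obtain ⟨_, hv⟩ := hm.2 n v hg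
      exact ⟨hv, hm⟩
    | none =>
      have hn0 : n ≠ 0 := by
        intro h
        subst h
        rw [hm.1] at hg
        cases hg
      obtain ⟨k, hk⟩ : ∃ k, n.toNat = k + 1 := ⟨n.toNat - 1, by omega⟩
      simp only [PySem.List.pyRange_zero_natCast]
      obtain ⟨h1, h2⟩ := bc_fold P fuel n hn (by omega) ih (List.range P.length)
        (10 ^ 7 + 9) memo hm
      have hbest : ((List.map (fun k : Nat => (k : Int)) (List.range P.length)).foldl
          (fun (acc : Int × PySem.Dict Int Int) j =>
            if j + 1 ≤ n then
              (min acc.1 ((bestCost P fuel (n - (j + 1)) acc.2).1 + PySem.List.pyGetD P j 0),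
                (bestCost P fuel (n - (j + 1)) acc.2).2)
            else acc) ((10 ^ 7 + 9 : Int), memo)).1 = rodF P n.toNat := by
        rw [h1, hk]
        rw [show (10 ^ 7 + 9 : Int) = rodSENT from rfl,
          guard_fold P.length (k + 1) (rodG P (k + 1)), ← f_char]
      refine ⟨hbest, ?_, ?_⟩
      · rw [PySem.Dict.get?_insert, if_neg (by omega : ¬ (0 : Int) = n)]
        exact h2.1
      · intro k' v' hk'
        rw [PySem.Dict.get?_insert] at hk'
        by_cases he : k' = n
        · subst he
          rw [if_pos rfl] at hk'
          cases hk'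
          exact ⟨hn, hbest⟩
        · rw [if_neg he] at hk'
          exact h2.2 k' v' hk'

theorem rodInv_init (P : List Int) :
    rodInv P ((PySem.Dict.empty : PySem.Dict Int Int).insert 0 0) := by
  constructor
  · exact PySem.Dict.get?_insert_self _ _ _
  · intro k v hk
    rw [PySem.Dict.get?_insert] at hk
    by_cases he : k = 0
    · subst he
      rw [if_pos rfl] at hk
      cases hk
      exact ⟨le_refl 0, rfl⟩
    · rw [if_neg he, PySem.Dict.get?_empty] at hk
      cases hk

theorem rodInv_warm (P : List Int) :
    ∀ (ts : List Int) (memo : PySem.Dict Int Int), (∀ t ∈ ts, 0 ≤ t) → rodInv P memo →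
      rodInv P (ts.foldl (fun memo t => (bestCost P (t.toNat + 1) t memo).2) memo) := by
  intro ts
  induction ts with
  | nil => intro memo _ hm; exact hm
  | cons t ts ih =>
    intro memo hts hm
    exact ih _ (fun x hx => hts x (by simp [hx]))
      (bc_correct P (t.toNat + 1) t memo hm (hts t (by simp)) (by omega)).2

theorem B_eq (P : List Int) (L : Int) (hL : 0 ≤ L) :
    Min_Rod_Value_alt L P = rodF P L.toNat := by
  unfold Min_Rod_Value_alt
  have hwarm : rodInv P ((PySem.List.pyRange 0 L 500).foldl
      (fun memo t => (bestCost P (t.toNat + 1) t memo).2)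
      ((PySem.Dict.empty : PySem.Dict Int Int).insert 0 0)) := by
    apply rodInv_warm P _ _ _ (rodInv_init P)
    intro t ht
    obtain ⟨h1, -, -⟩ := (PySem.List.mem_pyRange_iff_of_pos (by norm_num : (0:Int) < 500) t).mp ht
    exact h1
  exact (bc_correct P (L.toNat + 1) L _ hwarm hL (by omega)).1

-- ===== VERDICT (by name: the statement is the Claim_ definition above) =====
theorem Min_Rod_Value_spec : Claim_equal_Min_Rod_Value := by
  intro L P _hD hP
  unfold Spec_Min_Rod_Value
  rw [B_eq P L hP]
  have hL : L = ((L.toNat : Nat) : Int) := by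
    have : (0 : Int) ≤ L := hP
    omega
  conv_lhs => rw [hL]
  rw [A_eq]
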